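-- pv_equiv track=rewrite | github.com/Ahntoday/algorithm | programmers/high_score_kit/스택,큐/기능개발.py | solution
-- ===== SOURCE A (Python) =====
-- import math
--
-- def solution(progresses, speeds):
--     answer = []
--     number = 1
--     time = math.ceil((100 - progresses[0]) / speeds[0])
--     for i in range(1, len(progresses)):
--         if time >= math.ceil((100 - progresses[i]) / speeds[i]):
--             number += 1
--         else:
--             answer.append(number)
--             number = 1
--             time = math.ceil((100 - progresses[i]) / speeds[i])
--     answer.append(number)
--
--     return answer
-- ===== SOURCE B (Python) =====
-- import math
--
-- def solution(progresses, speeds):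
--     # pass 1: completion day of each feature
--     days = [math.ceil((100 - progresses[i]) / speeds[i]) for i in range(len(progresses))]
--     # pass 2: deployment wave of each feature = running maximum of completion days
--     waves = []
--     m = None
--     for d in days:
--         if m is None or d > m:
--             m = d
--         waves.append(m)
--     # pass 3: wave sizes = multiplicity of each wave value, in first-appearance order
--     counts = {}
--     for w in waves:
--         counts[w] = counts.get(w, 0) + 1
--     return list(counts.values())
-- ===== Notes on version B (the rewrite author's own statement) =====
-- stated objective: alternative
-- what changed: A's single fused loop with number/time accumulators is replaced by three staged passes: a completion-day table, the running maximum of that table (each item's deployment wave), and a dict counting the multiplicity of each wave value in first-appearance order.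
-- crash fix: On empty progresses A raises IndexError (progresses[0]); B returns []. — e.g. on solution([], []): A raises IndexError, B returns []
import Mathlib
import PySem

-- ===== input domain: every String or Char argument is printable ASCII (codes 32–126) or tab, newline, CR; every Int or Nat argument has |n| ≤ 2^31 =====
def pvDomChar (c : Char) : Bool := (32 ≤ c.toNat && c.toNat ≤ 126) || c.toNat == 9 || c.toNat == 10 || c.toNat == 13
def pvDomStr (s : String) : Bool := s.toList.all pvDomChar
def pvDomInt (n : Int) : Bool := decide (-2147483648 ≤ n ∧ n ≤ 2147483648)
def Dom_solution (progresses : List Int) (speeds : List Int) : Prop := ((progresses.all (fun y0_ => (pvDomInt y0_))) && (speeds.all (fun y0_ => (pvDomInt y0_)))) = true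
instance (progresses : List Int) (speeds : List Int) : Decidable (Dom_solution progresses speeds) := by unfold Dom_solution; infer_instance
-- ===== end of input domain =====

-- B replaces A's fused grouping loop by three staged passes: a completion-day table, its running
-- maximum (each item's wave), and a dict counting each wave value (objective: alternative, same cost).

-- math.ceil((100-p)/s) for ints in the domain: exact ceiling division, computed as -((-a)//s).
-- (Exact on Dom: |100-p| ≤ 2^31+100 and |s| ≤ 2^31 keep the float quotient's rounding from crossing an integer.)
def dayAt (progresses : List Int) (speeds : List Int) (i : Int) : Int :=
  -(PySem.Int.floordiv (-(100 - PySem.List.pyGetD progresses i 0)) (PySem.List.pyGetD speeds i 0))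

-- ===== PORT A =====
def solution (progresses : List Int) (speeds : List Int) : List Int :=
  let r := (PySem.List.pyRange 1 (progresses.length : Int) 1).foldl
    (fun (acc : List Int × Int × Int) i =>
      if dayAt progresses speeds i ≤ acc.2.2 then (acc.1, acc.2.1 + 1, acc.2.2)
      else (acc.1 ++ [acc.2.1], 1, dayAt progresses speeds i))
    ([], 1, dayAt progresses speeds 0)
  r.1 ++ [r.2.1]

-- ===== PORT B =====
def solution_alt (progresses : List Int) (speeds : List Int) : List Int :=
  let days := (PySem.List.pyRange 0 (progresses.length : Int) 1).map
    (fun i => dayAt progresses speeds i)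
  let r := days.foldl
    (fun (acc : Option Int × List Int) d =>
      let m := match acc.1 with
        | none => d
        | some m => if m < d then d else m
      (some m, acc.2 ++ [m]))
    (none, [])
  let counts := r.2.foldl
    (fun (c : PySem.Dict Int Int) w => c.insert w (c.getD w 0 + 1)) PySem.Dict.empty
  counts.values

-- ===== PRECONDITION & SPEC =====
-- Pre_ excludes exactly the inputs where Python A raises: empty progresses (IndexError on progresses[0]),
-- speeds shorter than progresses (IndexError), or a zero speed among the used prefix (ZeroDivisionError).
def Pre_solution (progresses : List Int) (speeds : List Int) : Prop :=
  progresses ≠ [] ∧ progresses.length ≤ speeds.length ∧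
    ∀ s ∈ speeds.take progresses.length, s ≠ 0
instance (progresses : List Int) (speeds : List Int) : Decidable (Pre_solution progresses speeds) := by
  unfold Pre_solution; infer_instance
def pvWitness_solution : List Int × List Int := ([30, 99, 5], [30, 1, 99])

-- On empty progresses A raises IndexError (progresses[0]); B returns [].
def Raises_solution (progresses : List Int) (speeds : List Int) : Prop := progresses = []
instance (progresses : List Int) (speeds : List Int) : Decidable (Raises_solution progresses speeds) := by
  unfold Raises_solution; infer_instance
def pvRaiseWitness_solution : List Int × List Int := ([], [])
def pvRaiseWitnessOut_solution : List Int := []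

def Spec_solution (progresses : List Int) (speeds : List Int) (out : List Int) : Prop := out = solution_alt progresses speeds
instance (progresses : List Int) (speeds : List Int) (out : List Int) : Decidable (Spec_solution progresses speeds out) := by unfold Spec_solution; infer_instance

-- ===== CLAIM (what is proved, stated in full; the proofs are below) =====
def Claim_equal_solution : Prop := ∀ (progresses : List Int) (speeds : List Int), Dom_solution progresses speeds → Pre_solution progresses speeds → Spec_solution progresses speeds (solution progresses speeds)
def Claim_raises_solution : Prop := (∀ (progresses : List Int) (speeds : List Int), Dom_solution progresses speeds → Raises_solution progresses speeds → ¬ Pre_solution progresses speeds) ∧ (Dom_solution (pvRaiseWitness_solution.1) (pvRaiseWitness_solution.2) ∧ Raises_solution (pvRaiseWitness_solution.1) (pvRaiseWitness_solution.2) ∧ solution_alt (pvRaiseWitness_solution.1) (pvRaiseWitness_solution.2) = pvRaiseWitnessOut_solution)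

-- ===== LEMMAS AND PROOFS =====

-- the grouping that both programs compute, read off A's loop: G n t ds = sizes of the waves
def G (n t : Int) : List Int → List Int
  | [] => [n]
  | d :: ds => if d ≤ t then G (n + 1) t ds else n :: G 1 d ds

-- running maximum of ds continuing from current maximum t (B's pass 2 after the first element)
def scanMax (t : Int) : List Int → List Int
  | [] => []
  | d :: ds => (if t < d then d else t) :: scanMax (if t < d then d else t) ds

-- A's fold computes G
lemma A_eq_G (ds : List Int) : ∀ (a : List Int) (n t : Int),
    (ds.foldl (fun (acc : List Int × Int × Int) d =>
        if d ≤ acc.2.2 then (acc.1, acc.2.1 + 1, acc.2.2)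
        else (acc.1 ++ [acc.2.1], 1, d)) (a, n, t)).1
      ++ [(ds.foldl (fun (acc : List Int × Int × Int) d =>
        if d ≤ acc.2.2 then (acc.1, acc.2.1 + 1, acc.2.2)
        else (acc.1 ++ [acc.2.1], 1, d)) (a, n, t)).2.1]
    = a ++ G n t ds := by
  induction ds with
  | nil => intro a n t; simp [G]
  | cons d ds ih =>
    intro a n t
    simp only [List.foldl_cons, G]
    by_cases h : d ≤ t
    · rw [if_pos h, if_pos h, ih]
    · rw [if_neg h, if_neg h, ih, List.append_assoc]; rfl

-- B's pass-2 fold produces scanMax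
lemma waves_eq_scanMax (ds : List Int) : ∀ (t : Int) (ws : List Int),
    (ds.foldl (fun (acc : Option Int × List Int) d =>
        (some (match acc.1 with
          | none => d
          | some m => if m < d then d else m),
         acc.2 ++ [match acc.1 with
          | none => d
          | some m => if m < d then d else m])) (some t, ws)).2 = ws ++ scanMax t ds := by
  induction ds with
  | nil => intro t ws; simp [scanMax]
  | cons d ds ih =>
    intro t ws
    simp only [List.foldl_cons, scanMax]
    rw [ih, List.append_assoc]; rfl

-- lookup in a mk-dict skips a prefix whose keys differ from the query
lemma get?_mk_append_of_ne (P : List (Int × Int)) (rest : List (Int × Int)) (x : Int)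
    (h : ∀ k ∈ P.map Prod.fst, k ≠ x) :
    (PySem.Dict.mk (P ++ rest)).get? x = (PySem.Dict.mk rest).get? x := by
  induction P with
  | nil => rfl
  | cons p P ih =>
    rw [List.cons_append, PySem.Dict.get?_mk_cons]
    have hp : p.1 ≠ x := h p.1 (by simp)
    simp only [beq_iff_eq, if_neg hp]
    exact ih (fun k hk => h k (by simp [hk]))

-- B's counting fold over the waves, run from a dict P ++ [(t,n)] with all prefix keys below t,
-- computes P's values followed by G n t ds.
lemma dict_fold_eq_G (ds : List Int) : ∀ (t n : Int) (P : List (Int × Int)),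
    (∀ k ∈ P.map Prod.fst, k < t) →
    ((scanMax t ds).foldl (fun (c : PySem.Dict Int Int) w => c.insert w (c.getD w 0 + 1))
        (PySem.Dict.mk (P ++ [(t, n)]))).values
      = P.map Prod.snd ++ G n t ds := by
  induction ds with
  | nil =>
    intro t n P _
    simp [G, scanMax, PySem.Dict.values]
  | cons d ds ih =>
    intro t n P hP
    have hPne : ∀ k ∈ P.map Prod.fst, k ≠ t := fun k hk => ne_of_lt (hP k hk)
    simp only [scanMax, List.foldl_cons, G]
    by_cases h : t < d
    · -- new wave: key d is fresh, insert appends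
      rw [if_pos h, if_neg (by omega)]
      have hfresh : ∀ k ∈ (P ++ [(t, n)]).map Prod.fst, k ≠ d := by
        intro k hk
        rw [List.map_append] at hk
        rcases List.mem_append.1 hk with hk' | hk'
        · exact ne_of_lt (lt_trans (hP k hk') h)
        · simp at hk'; omega
      have hget : (PySem.Dict.mk (P ++ [(t, n)])).get? d = none := by
        rw [show P ++ [(t, n)] = (P ++ [(t, n)]) ++ [] by simp,
          get?_mk_append_of_ne _ _ _ hfresh]; rfl
      have hcont : (PySem.Dict.mk (P ++ [(t, n)])).contains d = false := by
        rw [PySem.Dict.contains_eq_isSome_get?, hget]; rfl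
      have hgd : (PySem.Dict.mk (P ++ [(t, n)])).getD d 0 = 0 :=
        PySem.Dict.getD_of_not_contains _ _ hcont
      have hins : (PySem.Dict.mk (P ++ [(t, n)])).insert d ((PySem.Dict.mk (P ++ [(t, n)])).getD d 0 + 1)
          = PySem.Dict.mk ((P ++ [(t, n)]) ++ [(d, 1)]) := by
        apply PySem.Dict.ext
        rw [hgd, PySem.Dict.items_insert_of_not_contains _ _ hcont]
        simp
      rw [hins, ih d 1 (P ++ [(t, n)]) (by
        intro k hk
        rw [List.map_append] at hk
        rcases List.mem_append.1 hk with hk' | hk'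
        · exact lt_trans (hP k hk') h
        · simp at hk'; omega)]
      simp
    · -- same wave: key t is present last, insert overwrites in place
      rw [if_neg h, if_pos (by omega)]
      have hget : (PySem.Dict.mk (P ++ [(t, n)])).get? t = some n := by
        rw [get?_mk_append_of_ne _ _ _ hPne, PySem.Dict.get?_mk_cons]; simp
      have hgd : (PySem.Dict.mk (P ++ [(t, n)])).getD t 0 = n :=
        PySem.Dict.getD_of_get?_eq_some _ _ hget
      have hcont : (PySem.Dict.mk (P ++ [(t, n)])).contains t = true := by
        rw [PySem.Dict.contains_eq_isSome_get?, hget]; rfl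
      have hins : (PySem.Dict.mk (P ++ [(t, n)])).insert t ((PySem.Dict.mk (P ++ [(t, n)])).getD t 0 + 1)
          = PySem.Dict.mk (P ++ [(t, n + 1)]) := by
        apply PySem.Dict.ext
        rw [hgd, PySem.Dict.items_insert_of_contains _ _ hcont]
        simp only [List.map_append]
        congr 1
        · have hid : List.map (fun p : Int × Int => if (p.1 == t) = true then (t, n + 1) else p) P
              = List.map id P :=
            List.map_congr_left (fun p hp => by
              have hpt : p.1 ≠ t := hPne p.1 (List.mem_map_of_mem hp)
              simp [hpt])
          rw [hid, List.map_id]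
        · simp
      rw [hins, ih t (n + 1) P hP]

-- ===== VERDICT (by name: the statement is the Claim_ definition above) =====
theorem solution_spec : Claim_equal_solution := by
  intro p s _ hpre
  unfold Spec_solution solution solution_alt
  have hne : p ≠ [] := hpre.1
  have hlen : (0 : Int) < (p.length : Int) := by
    cases p with
    | nil => exact absurd rfl hne
    | cons x xs => exact_mod_cast Nat.succ_pos xs.length
  dsimp only
  rw [PySem.List.pyRange_one_cons hlen]
  simp only [zero_add, List.map_cons, List.foldl_cons, List.nil_append]
  rw [waves_eq_scanMax]
  have hstep : ∀ (d0 : Int) (ws : List Int),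
      ((d0 :: ws).foldl (fun (c : PySem.Dict Int Int) w => c.insert w (c.getD w 0 + 1))
        PySem.Dict.empty)
      = (ws.foldl (fun (c : PySem.Dict Int Int) w => c.insert w (c.getD w 0 + 1))
        (PySem.Dict.mk ([] ++ [(d0, 1)]))) := by
    intro d0 ws; rfl
  rw [List.singleton_append, hstep, dict_fold_eq_G _ _ _ [] (by simp)]
  rw [← List.foldl_map (f := fun i => dayAt p s i)
    (g := fun (acc : List Int × Int × Int) d =>
      if d ≤ acc.2.2 then (acc.1, acc.2.1 + 1, acc.2.2) else (acc.1 ++ [acc.2.1], 1, d)),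
    A_eq_G]
  simp

@[simp] theorem solution_raises : Claim_raises_solution := by
  unfold Claim_raises_solution
  exact ⟨fun p s _ hr hpre => hpre.1 hr, by decide⟩
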